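-- pv_equiv track=rewrite | github.com/LivingLogic/LivingLogic.Python.xist | src/ll/ul4c.py | _sourceprefix
-- ===== SOURCE A (Python) =====
-- def _sourceprefix(source, pos):
-- 	outerstartpos = innerstartpos = pos
--
-- 	preprefix = ""
-- 	maxprefix = 40
-- 	while maxprefix > 0:
-- 		# We arrived at the start of the source
-- 		if outerstartpos == 0:
-- 			break
-- 		# We arrived at the start of the line
-- 		if source[outerstartpos-1] == "\n":
-- 			break
-- 		maxprefix -= 1
-- 		outerstartpos -= 1
-- 	else:
-- 		# We've exhausted the length of the prefix
-- 		preprefix = "\N{HORIZONTAL ELLIPSIS}"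
--
-- 	return preprefix + source[outerstartpos:innerstartpos]
-- ===== SOURCE B (Python) =====
-- def _sourceprefix(source, pos):
--     if pos < 0 or pos > len(source):
--         raise IndexError("source position out of range")
--     linestart = source.rfind("\n", 0, pos) + 1
--     if pos - linestart < 40:
--         return source[linestart:pos]
--     return "\u2026" + source[pos - 40:pos]
-- ===== Notes on version B (the rewrite author's own statement) =====
-- stated objective: simpler
-- what changed: Replaces A's bounded backward character-scan loop (Python while-else) by validating pos, computing the line start directly with one rfind, and slicing; Pre_ excludes negative pos, where A's negative-index wraparound scan is accidental (A sometimes raises, sometimes returns a shifted value), and pos > len(source), where A raises IndexError.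
-- outside the precondition, e.g. on _sourceprefix('\n0y\nc \n1by1x9ay', -3): A returns '1by1x', B raises IndexError
import Mathlib
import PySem

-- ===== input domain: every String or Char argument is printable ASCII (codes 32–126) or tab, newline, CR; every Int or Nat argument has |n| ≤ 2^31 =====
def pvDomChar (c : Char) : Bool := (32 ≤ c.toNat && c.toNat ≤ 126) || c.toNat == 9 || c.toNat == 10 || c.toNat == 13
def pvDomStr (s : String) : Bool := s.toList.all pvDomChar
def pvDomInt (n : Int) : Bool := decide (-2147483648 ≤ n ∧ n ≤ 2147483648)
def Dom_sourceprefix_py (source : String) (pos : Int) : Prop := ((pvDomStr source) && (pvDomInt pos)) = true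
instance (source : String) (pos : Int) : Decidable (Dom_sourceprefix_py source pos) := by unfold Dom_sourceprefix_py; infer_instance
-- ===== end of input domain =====

-- B replaces A's bounded backward scan (while-else) by one rfind for the line start plus a slice: simpler, no loop.

-- ===== PORT A =====
-- the while-loop of A: state is (outerstartpos, fuel = maxprefix); returns final outerstartpos and preprefix
-- ("…" exactly when the loop ran out of fuel, i.e. Python's while-else fired).
-- The `none` branch of pyGet? is Python's IndexError; those inputs are outside Pre_.
def sourceprefixLoopA (source : List Char) (outer : Int) (fuel : Nat) : Int × List Char :=
  match fuel with
  | 0 => (outer, ['…'])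
  | m + 1 =>
    if outer = 0 then (outer, [])
    else
      match PySem.List.pyGet? source (outer - 1) with
      | none => (outer, [])          -- IndexError in Python; unreachable under Pre_
      | some c => if c = '\n' then (outer, []) else sourceprefixLoopA source (outer - 1) m

def sourceprefix_py (source : String) (pos : Int) : String :=
  let r := sourceprefixLoopA source.toList pos 40
  String.ofList (r.2 ++ PySem.List.slice source.toList (some r.1) (some pos))

-- ===== PORT B =====
def sourceprefix_py_alt (source : String) (pos : Int) : String :=
  if pos < 0 ∨ PySem.Str.len source < pos then ""   -- IndexError in Python; outside Pre_
  else
  let linestart := PySem.Chars.rfindFrom source.toList ['\n'] 0 (some pos) + 1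
  if pos - linestart < 40 then
    String.ofList (PySem.List.slice source.toList (some linestart) (some pos))
  else
    String.ofList ('…' :: PySem.List.slice source.toList (some (pos - 40)) (some pos))

-- ===== PRECONDITION & SPEC =====
-- Pre_ excludes pos > len(source) (A raises IndexError there) and pos < 0 (A then scans with Python's
-- negative-index wraparound, an accident of its implementation that sometimes raises and sometimes
-- returns a shifted value; B's clamping rfind/slices differ there).
def Pre_sourceprefix_py (source : String) (pos : Int) : Prop :=
  0 ≤ pos ∧ pos ≤ PySem.Str.len source
instance (source : String) (pos : Int) : Decidable (Pre_sourceprefix_py source pos) := by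
  unfold Pre_sourceprefix_py; infer_instance

def pvWitness_sourceprefix_py : String × Int := ("ab\ncd", 4)

def Spec_sourceprefix_py (source : String) (pos : Int) (out : String) : Prop := out = sourceprefix_py_alt source pos
instance (source : String) (pos : Int) (out : String) : Decidable (Spec_sourceprefix_py source pos out) := by unfold Spec_sourceprefix_py; infer_instance

-- ===== CLAIM (what is proved, stated in full; the proofs are below) =====
def Claim_equal_sourceprefix_py : Prop := ∀ (source : String) (pos : Int), Dom_sourceprefix_py source pos → Pre_sourceprefix_py source pos → Spec_sourceprefix_py source pos (sourceprefix_py source pos)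

-- ===== LEMMAS AND PROOFS =====

def pvTailRun (t : List Char) : Nat := (t.reverse.takeWhile (fun c => c ≠ '\n')).length

theorem pvTailRun_snoc (t : List Char) (c : Char) :
    pvTailRun (t ++ [c]) = if c = '\n' then 0 else pvTailRun t + 1 := by
  by_cases h : c = '\n' <;> simp [pvTailRun, h]

theorem pvTailRun_le (t : List Char) : pvTailRun t ≤ t.length := by
  have h := (List.takeWhile_sublist (fun c => (c ≠ '\n' : Bool)) (l := t.reverse)).length_le
  simpa [pvTailRun] using h

theorem loop_char (l : List Char) (m : Nat) : ∀ n : Nat, n ≤ l.length →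
    sourceprefixLoopA l (n : Int) m =
      if pvTailRun (l.take n) < m then (((n - pvTailRun (l.take n) : Nat) : Int), [])
      else (((n - m : Nat) : Int), ['…']) := by
  induction m with
  | zero => intro n hn; simp [sourceprefixLoopA]
  | succ m ih =>
    intro n hn
    match n with
    | 0 => simp [sourceprefixLoopA, pvTailRun]
    | k + 1 =>
      have hk : k < l.length := hn
      have hcast : ((k + 1 : Nat) : Int) - 1 = (k : Int) := by push_cast; ring
      have hget : PySem.List.pyGet? l (((k + 1 : Nat) : Int) - 1) = some l[k] := by
        rw [hcast]; simp [hk]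
      have htake : l.take (k + 1) = l.take k ++ [l[k]] := by
        rw [List.take_add_one]; simp [hk]
      have htr := pvTailRun_snoc (l.take k) l[k]
      have hne : ((k + 1 : Nat) : Int) ≠ 0 := by positivity
      have hsome : l[k]? = some l[k] := List.getElem?_eq_getElem hk
      have hne' : ¬((k:Int) + 1 = 0) := by omega
      by_cases hc : l[k] = '\n'
      · have htr0 : pvTailRun (l.take (k+1)) = 0 := by rw [htake, htr, if_pos hc]
        simp [sourceprefixLoopA, hne', hsome, hc, htr0]
      · have htr' : pvTailRun (l.take (k+1)) = pvTailRun (l.take k) + 1 := by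
          rw [htake, htr, if_neg hc]
        have hrec : sourceprefixLoopA l ((k + 1 : Nat) : Int) (m+1)
            = sourceprefixLoopA l ((k : Nat) : Int) m := by
          simp [sourceprefixLoopA, hne', hsome, hc]
        rw [hrec, ih k (le_of_lt hk), htr']
        have hle : pvTailRun (l.take k) ≤ k := le_trans (pvTailRun_le _) (by simp)
        by_cases hlt : pvTailRun (l.take k) < m
        · rw [if_pos hlt, if_pos (by omega)]
          congr 2; omega
        · rw [if_neg hlt, if_neg (by omega)]
          congr 2; omega

theorem prefix_nl (xs : List Char) : (['\n'].isPrefixOf xs = true) ↔ xs.head? = some '\n' := by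
  cases xs with
  | nil => simp [List.isPrefixOf]
  | cons a l => simp [List.isPrefixOf]; exact eq_comm

theorem go_newline (t : List Char) : ∀ i : Nat,
    PySem.Chars.rfind.go t ['\n'] i + 1 =
      ((min (i + 1) t.length - pvTailRun (t.take (i + 1)) : Nat) : Int) := by
  intro i
  induction i with
  | zero =>
    rw [PySem.Chars.rfind.go]
    match t with
    | [] => simp [List.isPrefixOf, pvTailRun]
    | c :: rest =>
      have htr' : pvTailRun [c] = if c = '\n' then 0 else 1 := by
        have h := pvTailRun_snoc [] c
        simpa [pvTailRun] using h
      by_cases hc : c = '\n'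
      · rw [hc] at htr'; simp at htr'
        simp [List.isPrefixOf, hc, htr']
      · rw [if_neg hc] at htr'
        have hp : ¬('\n' = c) := fun h => hc h.symm
        simp [List.isPrefixOf, hp, htr']
  | succ j ih =>
    rw [PySem.Chars.rfind.go]
    by_cases hj : j + 1 < t.length
    · have hsome : (t.drop (j+1)).head? = some t[j+1] := by
        rw [List.head?_drop]; exact List.getElem?_eq_getElem hj
      have htake : t.take (j+2) = t.take (j+1) ++ [t[j+1]] := by
        rw [List.take_add_one]; simp [hj]
      have htr := pvTailRun_snoc (t.take (j+1)) t[j+1]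
      have htr2 : pvTailRun (t.take (j+2)) = if t[j+1] = '\n' then 0 else pvTailRun (t.take (j+1)) + 1 := by
        rw [htake, htr]
      have hle : pvTailRun (t.take (j+1)) ≤ j + 1 :=
        le_trans (pvTailRun_le _) (by simp)
      by_cases hc : t[j+1] = '\n'
      · have hpre : ['\n'].isPrefixOf (t.drop (j+1)) = true := by
          rw [prefix_nl, hsome, hc]
        rw [if_pos hpre]
        rw [htr2, if_pos hc]
        have : min (j + 1 + 1) t.length = j + 2 := by omega
        rw [this]; push_cast; ring
      · have hpre : ¬ (['\n'].isPrefixOf (t.drop (j+1)) = true) := by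
          rw [prefix_nl, hsome]; simp [hc]
        rw [if_neg hpre, ih, htr2, if_neg hc]
        have h1 : min (j + 1) t.length = j + 1 := by omega
        have h2 : min (j + 1 + 1) t.length = j + 2 := by omega
        rw [h1, h2]
        have : j + 2 - (pvTailRun (t.take (j+1)) + 1) = j + 1 - pvTailRun (t.take (j+1)) := by omega
        rw [this]
    · have hdrop : t.drop (j+1) = [] := by
        rw [List.drop_eq_nil_iff]; omega
      have hpre : ¬ (['\n'].isPrefixOf (t.drop (j+1)) = true) := by
        rw [hdrop]; simp [List.isPrefixOf]
      rw [if_neg hpre, ih]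
      have htk : t.take (j+1) = t := List.take_of_length_le (by omega)
      have htk2 : t.take (j+1+1) = t := List.take_of_length_le (by omega)
      rw [htk, htk2]
      have h1 : min (j+1) t.length = t.length := by omega
      have h2 : min (j+1+1) t.length = t.length := by omega
      rw [h1, h2]

theorem rfind_newline (t : List Char) :
    PySem.Chars.rfind t ['\n'] + 1 = ((t.length - pvTailRun t : Nat) : Int) := by
  rw [PySem.Chars.rfind]
  match ht : t.length with
  | 0 =>
    have : t = [] := List.eq_nil_of_length_eq_zero ht
    subst this; rw [PySem.Chars.rfind.go]; simp [List.isPrefixOf, pvTailRun]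
  | i + 1 =>
    rw [go_newline t (i+1)]
    have : t.take (i + 1 + 1) = t := List.take_of_length_le (by omega)
    rw [this]
    congr 1
    omega

theorem rfindFrom_red (l : List Char) (pos : Int) (h0 : 0 ≤ pos) (h1 : pos ≤ (l.length : Int)) :
    PySem.Chars.rfindFrom l ['\n'] 0 (some pos) + 1 =
      ((pos.toNat - pvTailRun (l.take pos.toNat) : Nat) : Int) := by
  rw [PySem.Chars.rfindFrom]
  have he1 : ¬((l.length : Int) < pos) := not_lt.mpr h1
  have he2 : ¬(pos < (0:Int)) := not_lt.mpr h0
  simp only [he1, he2, if_false, lt_irrefl, Int.toNat_zero, List.drop_zero]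
  have hr := rfind_newline (l.take pos.toNat)
  have hlen : (l.take pos.toNat).length = pos.toNat := by
    simp; omega
  rw [hlen] at hr
  by_cases hm : PySem.Chars.rfind (l.take pos.toNat) ['\n'] = -1
  · rw [if_pos hm]
    rw [hm] at hr
    omega
  · rw [if_neg hm]
    omega

theorem sourceprefix_main (source : String) (pos : Int) (h0 : 0 ≤ pos) (h1 : pos ≤ PySem.Str.len source) :
    sourceprefix_py source pos = sourceprefix_py_alt source pos := by
  have hlen : PySem.Str.len source = (source.toList.length : Int) := by simp [PySem.Str.len_eq]
  rw [hlen] at h1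
  have hpos : pos = (pos.toNat : Int) := (Int.toNat_of_nonneg h0).symm
  have hn : pos.toNat ≤ source.toList.length := by omega
  have hlin := rfindFrom_red source.toList pos h0 h1
  unfold sourceprefix_py sourceprefix_py_alt
  have hg : ¬(pos < 0 ∨ PySem.Str.len source < pos) := by rw [hlen]; omega
  rw [if_neg hg]
  rw [hpos] at hlin ⊢
  rw [Int.toNat_natCast] at hlin
  rw [loop_char source.toList 40 pos.toNat hn]
  set j := pvTailRun (source.toList.take pos.toNat) with hj
  have hjn : j ≤ pos.toNat := le_trans (pvTailRun_le _) (by simp)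
  have hlin' : PySem.Chars.rfindFrom source.toList ['\n'] 0 (some (pos.toNat : Int)) + 1
      = ((pos.toNat - j : Nat) : Int) := hlin
  by_cases hlt : j < 40
  · rw [if_pos hlt]
    simp only [hlin']
    rw [if_pos (by omega : ((pos.toNat : Int)) - ((pos.toNat - j : Nat) : Int) < 40)]
    simp
  · rw [if_neg hlt]
    simp only [hlin']
    rw [if_neg (by omega : ¬(((pos.toNat : Int)) - ((pos.toNat - j : Nat) : Int) < 40))]
    have : ((pos.toNat : Int)) - 40 = ((pos.toNat - 40 : Nat) : Int) := by omega
    rw [this]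
    simp

-- ===== VERDICT (by name: the statement is the Claim_ definition above) =====
theorem sourceprefix_py_spec : Claim_equal_sourceprefix_py := by
  intro source pos _ hpre
  unfold Spec_sourceprefix_py
  exact sourceprefix_main source pos hpre.1 hpre.2
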